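-- pv_equiv track=rewrite | github.com/jstringara/advent-of-code | 10/second_part.py | find_trail_recurse
-- ===== SOURCE A (Python) =====
-- def find_trail_recurse(trail: list[tuple[int, int]], map: list[list[int]]):
--     i, j = trail[-1]
--     # return case
--     if map[i][j] == 9:
--         return trail
--     # explore the adjacent cells
--     up_trail = []
--     down_trail = []
--     left_trail = []
--     right_trail = []
--     if not i - 1 < 0 and map[i - 1][j] == map[i][j] + 1:
--         up_trail = find_trail_recurse(trail + [(i - 1, j)], map)
--     if not i + 1 >= len(map) and map[i + 1][j] == map[i][j] + 1:
--         down_trail = find_trail_recurse(trail + [(i + 1, j)], map)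
--     if not j - 1 < 0 and map[i][j - 1] == map[i][j] + 1:
--         left_trail = find_trail_recurse(trail + [(i, j - 1)], map)
--     if not j + 1 >= len(map[0]) and map[i][j + 1] == map[i][j] + 1:
--         right_trail = find_trail_recurse(trail + [(i, j + 1)], map)
--
--     trails = [
--         trail for trail in [up_trail, down_trail, left_trail, right_trail] if trail
--     ]
--
--     # make into a list of lists
--     trails = sum(trails, [])
--
--     return trails
-- ===== SOURCE B (Python) =====
-- def find_trail_recurse(trail: list[tuple[int, int]], map: list[list[int]]):
--     # iterative DFS with an explicit stack of partial trails (no recursion)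
--     stack = [list(trail)]
--     results = []
--     while stack:
--         t = stack.pop()
--         i, j = t[-1]
--         h = map[i][j]
--         if h == 9:
--             results.append(t)
--             continue
--         # push in reverse of A's up,down,left,right preorder so pops match it
--         if not j + 1 >= len(map[0]) and map[i][j + 1] == h + 1:
--             stack.append(t + [(i, j + 1)])
--         if not j - 1 < 0 and map[i][j - 1] == h + 1:
--             stack.append(t + [(i, j - 1)])
--         if not i + 1 >= len(map) and map[i + 1][j] == h + 1:
--             stack.append(t + [(i + 1, j)])
--         if not i - 1 < 0 and map[i - 1][j] == h + 1:
--             stack.append(t + [(i - 1, j)])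
--     return sum(results, [])
-- ===== Notes on version B (the rewrite author's own statement) =====
-- stated objective: alternative
-- what changed: Replaced A's recursive DFS (which concatenates and filters the four child results at every level) by an iterative DFS over an explicit stack of partial trails that collects complete trails in a results list, pushed in reverse neighbour order so the pop order reproduces A's up,down,left,right preorder, with one final concatenation.
-- outside the precondition, e.g. on find_trail_recurse([(0, 0)], [[9], [1, 2]]): A returns [(0, 0)], B returns [(0, 0)]
import Mathlib
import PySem

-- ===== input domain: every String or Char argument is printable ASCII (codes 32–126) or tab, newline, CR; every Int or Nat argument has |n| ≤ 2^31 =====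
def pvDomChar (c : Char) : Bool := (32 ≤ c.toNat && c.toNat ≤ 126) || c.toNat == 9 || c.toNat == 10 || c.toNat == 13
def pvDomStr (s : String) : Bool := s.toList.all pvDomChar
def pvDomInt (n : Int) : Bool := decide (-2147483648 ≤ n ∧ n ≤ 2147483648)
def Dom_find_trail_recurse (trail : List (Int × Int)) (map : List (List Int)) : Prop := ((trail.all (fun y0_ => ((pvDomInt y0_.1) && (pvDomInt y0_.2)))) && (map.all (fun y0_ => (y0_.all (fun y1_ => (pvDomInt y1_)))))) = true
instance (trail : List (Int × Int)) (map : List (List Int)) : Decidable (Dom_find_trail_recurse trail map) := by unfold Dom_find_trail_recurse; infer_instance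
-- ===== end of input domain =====

-- B replaces A's recursive DFS by an iterative DFS over an explicit stack of partial trails
-- (pushed in reverse neighbour order so pops reproduce A's up,down,left,right preorder),
-- collecting complete trails and concatenating them once at the end; same result, same cost.


-- Termination machinery shared by the two ports (values strictly increase along a trail,
-- so (max grid value + 1 - current value) is a decreasing measure).

/-- Largest value in the grid (0 if empty); any entry of `map` is ≤ `pvGmax map`. -/
def pvGmax (map : List (List Int)) : Int := map.foldl (fun a row => row.foldl max a) 0

/-- The value `map[i][j]` at the last cell `(i,j)` of a trail, Python indexing; `none` where Python raises. -/
def pvCellVal (map : List (List Int)) (t : List (Int × Int)) : Option Int :=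
  (PySem.List.pyGet? t (-1)).bind fun ij =>
    (PySem.List.pyGet? map ij.1).bind fun row => PySem.List.pyGet? row ij.2

/-- Depth measure for port A. -/
def pvDepth (map : List (List Int)) (t : List (Int × Int)) : Nat :=
  match pvCellVal map t with
  | some v => (pvGmax map + 1 - v).toNat
  | none => 0

/-- Weight of one stack entry for port B (exponential so that 4 children weigh less than a parent). -/
def pvWt (map : List (List Int)) (t : List (Int × Int)) : Nat :=
  match pvCellVal map t with
  | some v => 5 ^ (pvGmax map + 1 - v).toNat
  | none => 1

/-- Measure for port B's stack loop. -/
def pvMeas (map : List (List Int)) (stack : List (List (Int × Int))) : Nat :=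
  (stack.map (pvWt map)).sum

lemma pvGmax_aux (map : List (List Int)) (a : Int) :
    a ≤ map.foldl (fun a row => row.foldl max a) a ∧
    ∀ row ∈ map, ∀ v ∈ row, v ≤ map.foldl (fun a row => row.foldl max a) a := by
  induction map generalizing a with
  | nil => simp
  | cons r rs ih =>
    refine ⟨le_trans ((PySem.List.le_foldl_max r a).1) (ih (r.foldl max a)).1, ?_⟩
    intro row hrow v hv
    rcases List.mem_cons.mp hrow with h | h
    · subst h
      exact le_trans ((PySem.List.le_foldl_max row a).2 v hv) (ih (row.foldl max a)).1
    · exact (ih (r.foldl max a)).2 row h v hv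

lemma pvVal_le_gmax {map : List (List Int)} {i j v : Int}
    (h : ((PySem.List.pyGet? map i).bind fun r => PySem.List.pyGet? r j) = some v) :
    v ≤ pvGmax map := by
  rcases Option.bind_eq_some_iff.mp h with ⟨row, hrow, hv⟩
  exact (pvGmax_aux map 0).2 row (PySem.List.mem_of_pyGet?_eq_some _ hrow)
    v (PySem.List.mem_of_pyGet?_eq_some _ hv)

lemma pvCellVal_append {map : List (List Int)} (t : List (Int × Int)) (i' j' : Int) :
    pvCellVal map (t ++ [(i', j')]) =
      ((PySem.List.pyGet? map i').bind fun r => PySem.List.pyGet? r j') := by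
  simp [pvCellVal, PySem.List.pyGet?_neg_one_append_singleton]

lemma pvDepth_lt {map : List (List Int)} {t : List (Int × Int)} {v i' j' : Int}
    (hc : pvCellVal map t = some v)
    (hn : ((PySem.List.pyGet? map i').bind fun r => PySem.List.pyGet? r j') = some (v + 1)) :
    pvDepth map (t ++ [(i', j')]) < pvDepth map t := by
  have hle := pvVal_le_gmax hn
  simp only [pvDepth, pvCellVal_append, hn, hc]
  omega

lemma pvWt_append_eq {map : List (List Int)} {t : List (Int × Int)} {v i' j' : Int}
    (hn : ((PySem.List.pyGet? map i').bind fun r => PySem.List.pyGet? r j') = some (v + 1)) :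
    pvWt map (t ++ [(i', j')]) = 5 ^ (pvGmax map - v).toNat := by
  simp only [pvWt, pvCellVal_append, hn]
  congr 1
  omega

lemma pvWt_pos (map : List (List Int)) (t : List (Int × Int)) : 0 < pvWt map t := by
  unfold pvWt
  split <;> positivity

lemma pvMeas_tail_lt (map : List (List Int)) (t : List (Int × Int))
    (rest : List (List (Int × Int))) : pvMeas map rest < pvMeas map (t :: rest) := by
  have := pvWt_pos map t
  simp [pvMeas]
  omega

lemma pvMeas_step_lt (map : List (List Int)) (t : List (Int × Int))
    (rest : List (List (Int × Int))) {v : Int}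
    {l1 l2 l3 l4 : List (List (Int × Int))}
    (hc : pvCellVal map t = some v) (hv : v ≤ pvGmax map)
    (b1 : (l1.map (pvWt map)).sum ≤ 5 ^ (pvGmax map - v).toNat)
    (b2 : (l2.map (pvWt map)).sum ≤ 5 ^ (pvGmax map - v).toNat)
    (b3 : (l3.map (pvWt map)).sum ≤ 5 ^ (pvGmax map - v).toNat)
    (b4 : (l4.map (pvWt map)).sum ≤ 5 ^ (pvGmax map - v).toNat) :
    pvMeas map (l1 ++ l2 ++ l3 ++ l4 ++ rest) < pvMeas map (t :: rest) := by
  have hw : pvWt map t = 5 ^ ((pvGmax map - v).toNat + 1) := by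
    have : (pvGmax map + 1 - v).toNat = (pvGmax map - v).toNat + 1 := by omega
    simp [pvWt, hc, this]
  have hK : 1 ≤ 5 ^ (pvGmax map - v).toNat := Nat.one_le_pow _ _ (by omega)
  simp only [pvMeas, List.map_append, List.sum_append, List.map_cons, List.sum_cons, hw,
    pow_succ]
  omega

-- ===== PORT A =====
-- Literal port of A's recursive DFS.  Where Python raises (empty trail, index out of
-- range, ragged map probed out of bounds) the corresponding pyGet? is none and the port
-- returns [] / treats the guard as false; all such inputs are excluded by Pre_.
def find_trail_recurse (trail : List (Int × Int)) (map : List (List Int)) : List (Int × Int) :=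
  match h1 : PySem.List.pyGet? trail (-1) with          -- i, j = trail[-1]
  | none => []
  | some (i, j) =>
    match h2 : PySem.List.pyGet? map i with
    | none => []
    | some rowi =>
      match h3 : PySem.List.pyGet? rowi j with          -- map[i][j]
      | none => []
      | some v =>
        if v = 9 then trail
        else
          let up_trail :=
            if _h4 : ¬ i - 1 < 0 ∧ ((PySem.List.pyGet? map (i - 1)).bind fun r => PySem.List.pyGet? r j) = some (v + 1)
            then find_trail_recurse (trail ++ [(i - 1, j)]) map else []
          let down_trail :=
            if _h5 : ¬ i + 1 ≥ (map.length : Int) ∧ ((PySem.List.pyGet? map (i + 1)).bind fun r => PySem.List.pyGet? r j) = some (v + 1)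
            then find_trail_recurse (trail ++ [(i + 1, j)]) map else []
          let left_trail :=
            if _h6 : ¬ j - 1 < 0 ∧ ((PySem.List.pyGet? map i).bind fun r => PySem.List.pyGet? r (j - 1)) = some (v + 1)
            then find_trail_recurse (trail ++ [(i, j - 1)]) map else []
          let right_trail :=
            if _h7 : ¬ j + 1 ≥ ((((PySem.List.pyGet? map 0).getD []).length : Int)) ∧ ((PySem.List.pyGet? map i).bind fun r => PySem.List.pyGet? r (j + 1)) = some (v + 1)
            then find_trail_recurse (trail ++ [(i, j + 1)]) map else []
          (([up_trail, down_trail, left_trail, right_trail].filter (fun l => !l.isEmpty)).flatten)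
termination_by pvDepth map trail
decreasing_by
  · exact pvDepth_lt (by simp [pvCellVal, h1, h2, h3]) _h4.2
  · exact pvDepth_lt (by simp [pvCellVal, h1, h2, h3]) _h5.2
  · exact pvDepth_lt (by simp [pvCellVal, h1, h2, h3]) _h6.2
  · exact pvDepth_lt (by simp [pvCellVal, h1, h2, h3]) _h7.2

-- ===== PORT B =====
-- The stack is a Lean list with its TOP AT THE HEAD (Python pushes/pops at the end of the
-- list); B pushes right, left, down, up, so after the four pushes the top-down stack order
-- is up, down, left, right — which is exactly the head-first list below.
def btLoop (map : List (List Int)) (stack : List (List (Int × Int))) (results : List (List (Int × Int))) : List (List (Int × Int)) :=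
  match stack with
  | [] => results
  | t :: rest =>
    match h1 : PySem.List.pyGet? t (-1) with            -- i, j = t[-1]
    | none => btLoop map rest results                   -- Python raises here; outside Pre_
    | some (i, j) =>
      match h2 : PySem.List.pyGet? map i with
      | none => btLoop map rest results
      | some rowi =>
        match h3 : PySem.List.pyGet? rowi j with        -- h = map[i][j]
        | none => btLoop map rest results
        | some v =>
          if v = 9 then btLoop map rest (results ++ [t])
          else
            btLoop map
              ((if _h4 : ¬ i - 1 < 0 ∧ ((PySem.List.pyGet? map (i - 1)).bind fun r => PySem.List.pyGet? r j) = some (v + 1)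
                then [t ++ [(i - 1, j)]] else []) ++
               (if _h5 : ¬ i + 1 ≥ (map.length : Int) ∧ ((PySem.List.pyGet? map (i + 1)).bind fun r => PySem.List.pyGet? r j) = some (v + 1)
                then [t ++ [(i + 1, j)]] else []) ++
               (if _h6 : ¬ j - 1 < 0 ∧ ((PySem.List.pyGet? map i).bind fun r => PySem.List.pyGet? r (j - 1)) = some (v + 1)
                then [t ++ [(i, j - 1)]] else []) ++
               (if _h7 : ¬ j + 1 ≥ ((((PySem.List.pyGet? map 0).getD []).length : Int)) ∧ ((PySem.List.pyGet? map i).bind fun r => PySem.List.pyGet? r (j + 1)) = some (v + 1)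
                then [t ++ [(i, j + 1)]] else []) ++ rest)
              results
termination_by pvMeas map stack
decreasing_by
  · exact pvMeas_tail_lt map t rest
  · exact pvMeas_tail_lt map t rest
  · exact pvMeas_tail_lt map t rest
  · exact pvMeas_tail_lt map t rest
  · have hc : pvCellVal map t = some v := by simp [pvCellVal, h1, h2, h3]
    have hv : v ≤ pvGmax map := pvVal_le_gmax (by rw [h2]; exact h3)
    refine pvMeas_step_lt map t rest hc hv ?_ ?_ ?_ ?_ <;>
      (split
       · next hg => simp [pvWt_append_eq hg.2]
       · simp)

def find_trail_recurse_alt (trail : List (Int × Int)) (map : List (List Int)) : List (Int × Int) :=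
  (btLoop map [trail] []).flatten                       -- sum(results, [])

-- ===== PRECONDITION & SPEC =====
-- Pre_ admits every nonempty trail whose last cell indexes a nonempty RECTANGULAR map within
-- Python's index range (negative wraparound included).  It excludes the inputs on which A
-- raises IndexError (empty trail, empty map, last cell out of range) and ragged maps, on
-- which whether A returns or raises depends on which cells the DFS happens to probe (and A
-- and B probe neighbours in different orders there).
def Pre_find_trail_recurse (trail : List (Int × Int)) (map : List (List Int)) : Prop :=
  trail ≠ [] ∧ map ≠ [] ∧ (∀ row ∈ map, row.length = (map.headD []).length) ∧
  -(map.length : Int) ≤ (trail.getLast?.getD (0, 0)).1 ∧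
  (trail.getLast?.getD (0, 0)).1 < (map.length : Int) ∧
  -((map.headD []).length : Int) ≤ (trail.getLast?.getD (0, 0)).2 ∧
  (trail.getLast?.getD (0, 0)).2 < ((map.headD []).length : Int)
instance (trail : List (Int × Int)) (map : List (List Int)) : Decidable (Pre_find_trail_recurse trail map) := by unfold Pre_find_trail_recurse; infer_instance

def pvWitness_find_trail_recurse : (List (Int × Int)) × List (List Int) := ([(0, 0)], [[8, 9]])

def Spec_find_trail_recurse (trail : List (Int × Int)) (map : List (List Int)) (out : List (Int × Int)) : Prop := out = find_trail_recurse_alt trail map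
instance (trail : List (Int × Int)) (map : List (List Int)) (out : List (Int × Int)) : Decidable (Spec_find_trail_recurse trail map out) := by unfold Spec_find_trail_recurse; infer_instance

-- ===== CLAIM (what is proved, stated in full; the proofs are below) =====
def Claim_equal_find_trail_recurse : Prop := ∀ (trail : List (Int × Int)) (map : List (List Int)), Dom_find_trail_recurse trail map → Pre_find_trail_recurse trail map → Spec_find_trail_recurse trail map (find_trail_recurse trail map)

-- ===== LEMMAS AND PROOFS =====

lemma pvFlatten_filter_not_isEmpty {α : Type} (L : List (List α)) :
    (L.filter (fun l => !l.isEmpty)).flatten = L.flatten := by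
  induction L with
  | nil => simp
  | cons x xs ih => cases x <;> simp [ih]

lemma pvA_none1 {t : List (Int × Int)} {map : List (List Int)}
    (h1 : PySem.List.pyGet? t (-1) = none) : find_trail_recurse t map = [] := by
  rw [find_trail_recurse.eq_def]; split <;> simp_all

lemma pvA_none2 {t : List (Int × Int)} {map : List (List Int)} {i j : Int}
    (h1 : PySem.List.pyGet? t (-1) = some (i, j))
    (h2 : PySem.List.pyGet? map i = none) : find_trail_recurse t map = [] := by
  rw [find_trail_recurse.eq_def]
  split
  · simp_all
  next i' j' heq =>
    rw [h1] at heq; injection heq with heq; injection heq with hi hj; subst hi; subst hj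
    split
    · rfl
    next rowi' heq2 => rw [h2] at heq2; cases heq2

lemma pvA_none3 {t : List (Int × Int)} {map : List (List Int)} {i j : Int} {rowi : List Int}
    (h1 : PySem.List.pyGet? t (-1) = some (i, j))
    (h2 : PySem.List.pyGet? map i = some rowi)
    (h3 : PySem.List.pyGet? rowi j = none) : find_trail_recurse t map = [] := by
  rw [find_trail_recurse.eq_def]
  split
  · simp_all
  next i' j' heq =>
    rw [h1] at heq; injection heq with heq; injection heq with hi hj; subst hi; subst hj
    split
    · simp_all
    next rowi' heq2 =>
      rw [h2] at heq2; injection heq2 with heq2; subst heq2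
      split
      · rfl
      next v' heq3 => rw [h3] at heq3; cases heq3

lemma pvA_nine {t : List (Int × Int)} {map : List (List Int)} {i j : Int} {rowi : List Int}
    (h1 : PySem.List.pyGet? t (-1) = some (i, j))
    (h2 : PySem.List.pyGet? map i = some rowi)
    (h3 : PySem.List.pyGet? rowi j = some 9) : find_trail_recurse t map = t := by
  rw [find_trail_recurse.eq_def]
  split
  · simp_all
  next i' j' heq =>
    rw [h1] at heq; injection heq with heq; injection heq with hi hj; subst hi; subst hj
    split
    · simp_all
    next rowi' heq2 =>
      rw [h2] at heq2; injection heq2 with heq2; subst heq2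
      split
      · simp_all
      next v' heq3 =>
        rw [h3] at heq3; injection heq3 with heq3; subst heq3
        rfl

lemma pvA_step {t : List (Int × Int)} {map : List (List Int)} {i j v : Int} {rowi : List Int}
    (h1 : PySem.List.pyGet? t (-1) = some (i, j))
    (h2 : PySem.List.pyGet? map i = some rowi)
    (h3 : PySem.List.pyGet? rowi j = some v) (h9 : ¬ v = 9) :
    find_trail_recurse t map =
      (if ¬ i - 1 < 0 ∧ ((PySem.List.pyGet? map (i - 1)).bind fun r => PySem.List.pyGet? r j) = some (v + 1)
        then find_trail_recurse (t ++ [(i - 1, j)]) map else []) ++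
      (if ¬ i + 1 ≥ (map.length : Int) ∧ ((PySem.List.pyGet? map (i + 1)).bind fun r => PySem.List.pyGet? r j) = some (v + 1)
        then find_trail_recurse (t ++ [(i + 1, j)]) map else []) ++
      (if ¬ j - 1 < 0 ∧ ((PySem.List.pyGet? map i).bind fun r => PySem.List.pyGet? r (j - 1)) = some (v + 1)
        then find_trail_recurse (t ++ [(i, j - 1)]) map else []) ++
      (if ¬ j + 1 ≥ ((((PySem.List.pyGet? map 0).getD []).length : Int)) ∧ ((PySem.List.pyGet? map i).bind fun r => PySem.List.pyGet? r (j + 1)) = some (v + 1)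
        then find_trail_recurse (t ++ [(i, j + 1)]) map else []) := by
  rw [find_trail_recurse.eq_def]
  split
  · simp_all
  next i' j' heq =>
    rw [h1] at heq; injection heq with heq; injection heq with hi hj; subst hi; subst hj
    split
    · simp_all
    next rowi' heq2 =>
      rw [h2] at heq2; injection heq2 with heq2; subst heq2
      split
      · simp_all
      next v' heq3 =>
        rw [h3] at heq3; injection heq3 with heq3; subst heq3
        rw [if_neg h9, pvFlatten_filter_not_isEmpty]
        simp only [dite_eq_ite, List.flatten_cons, List.flatten_nil, List.append_nil,
          List.append_assoc]

lemma btLoop_spec (map : List (List Int)) (stack : List (List (Int × Int)))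
    (results : List (List (Int × Int))) :
    (btLoop map stack results).flatten =
      results.flatten ++ (stack.map (fun t => find_trail_recurse t map)).flatten := by
  fun_induction btLoop map stack results with
  | case1 res => simp
  | case2 res t rest hA ih => rw [ih]; simp [pvA_none1 hA]
  | case3 res t rest i j hA hB ih => rw [ih]; simp [pvA_none2 hA hB]
  | case4 res t rest i j hA rowi hB hC ih => rw [ih]; simp [pvA_none3 hA hB hC]
  | case5 res t rest i j hA rowi hB hC ih => rw [ih]; simp [pvA_nine hA hB hC]
  | case6 res t rest i j hA rowi hB v hC h9 ih =>
    rw [ih, List.map_cons, List.flatten_cons]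
    rw [pvA_step hA hB hC h9]
    simp only [dite_eq_ite, List.map_append, List.flatten_append, List.append_assoc]
    split_ifs <;> simp

-- ===== VERDICT (by name: the statement is the Claim_ definition above) =====
theorem find_trail_recurse_spec : Claim_equal_find_trail_recurse := by
  intro trail map _ _
  unfold Spec_find_trail_recurse find_trail_recurse_alt
  rw [btLoop_spec]
  simp
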